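-- pv_equiv track=rewrite | github.com/memgraph/mage | python/embeddings.py | split_slices
-- ===== SOURCE A (Python) =====
-- def split_slices(n_items: int, n_parts: int):
--     base, rem = divmod(n_items, n_parts)
--     start = 0
--     slices = []
--     for i in range(n_parts):
--         end = start + base + (1 if i < rem else 0)
--         slices.append((start, end))
--         start = end
--     return slices
-- ===== SOURCE B (Python) =====
-- def split_slices(n_items: int, n_parts: int):
--     base, rem = divmod(n_items, n_parts)
--     return [(i * base + min(i, rem), (i + 1) * base + min(i + 1, rem))
--             for i in range(n_parts)]
-- ===== Notes on version B (the rewrite author's own statement) =====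
-- stated objective: simpler
-- what changed: Replaced the loop that threads a running `start` accumulator with a stateless list comprehension computing each slice boundary by the closed formula i*base + min(i, rem).
import Mathlib
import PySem

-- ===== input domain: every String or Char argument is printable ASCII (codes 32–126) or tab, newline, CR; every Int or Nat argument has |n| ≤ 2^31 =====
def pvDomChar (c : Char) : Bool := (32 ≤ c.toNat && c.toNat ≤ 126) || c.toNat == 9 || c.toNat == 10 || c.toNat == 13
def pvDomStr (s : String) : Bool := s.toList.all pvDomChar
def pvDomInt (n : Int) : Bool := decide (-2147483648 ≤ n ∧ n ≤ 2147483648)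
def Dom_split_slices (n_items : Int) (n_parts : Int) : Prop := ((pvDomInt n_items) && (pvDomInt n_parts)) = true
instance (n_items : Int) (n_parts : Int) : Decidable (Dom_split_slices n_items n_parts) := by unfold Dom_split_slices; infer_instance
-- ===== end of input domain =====

-- B replaces the running `start` accumulator of A with a closed per-index formula
-- in a list comprehension (objective: simpler). A raises ZeroDivisionError on
-- n_parts = 0, which Pre_ excludes.

-- ===== PORT A =====
def split_slices (n_items : Int) (n_parts : Int) : List (Int × Int) :=
  match PySem.Int.divmod? n_items n_parts with
  | none => []   -- unreachable under Pre_ (n_parts ≠ 0): Python raises ZeroDivisionError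
  | some (base, rem) =>
    ((PySem.List.pyRange 0 n_parts 1).foldl
      (fun (st : Int × List (Int × Int)) (i : Int) =>
        let «end» := st.1 + base + (if i < rem then 1 else 0)
        («end», st.2 ++ [(st.1, «end»)]))
      (0, [])).2

-- ===== PORT B =====
def split_slices_alt (n_items : Int) (n_parts : Int) : List (Int × Int) :=
  match PySem.Int.divmod? n_items n_parts with
  | none => []   -- unreachable under Pre_: Python raises ZeroDivisionError
  | some (base, rem) =>
    (PySem.List.pyRange 0 n_parts 1).map
      (fun i => (i * base + min i rem, (i + 1) * base + min (i + 1) rem))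

-- ===== PRECONDITION & SPEC =====
-- Pre_ excludes exactly n_parts = 0, where divmod in A raises ZeroDivisionError.
def Pre_split_slices (n_items : Int) (n_parts : Int) : Prop := n_parts ≠ 0
instance (n_items : Int) (n_parts : Int) : Decidable (Pre_split_slices n_items n_parts) := by unfold Pre_split_slices; infer_instance
def pvWitness_split_slices : Int × Int := (10, 3)

def Spec_split_slices (n_items : Int) (n_parts : Int) (out : List (Int × Int)) : Prop := out = split_slices_alt n_items n_parts
instance (n_items : Int) (n_parts : Int) (out : List (Int × Int)) : Decidable (Spec_split_slices n_items n_parts out) := by unfold Spec_split_slices; infer_instance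

-- ===== CLAIM (what is proved, stated in full; the proofs are below) =====
def Claim_equal_split_slices : Prop := ∀ (n_items : Int) (n_parts : Int), Dom_split_slices n_items n_parts → Pre_split_slices n_items n_parts → Spec_split_slices n_items n_parts (split_slices n_items n_parts)

-- ===== LEMMAS AND PROOFS =====

-- Invariant: after folding over pyRange 0 n 1 the running start is n*base + min n rem
-- and the accumulated list is the closed-form map, provided 0 ≤ rem.
theorem split_slices_fold_inv (base rem : Int) (hrem : 0 ≤ rem) (n : Int) (hn : 0 ≤ n) :
    (PySem.List.pyRange 0 n 1).foldl
      (fun (st : Int × List (Int × Int)) (i : Int) =>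
        (st.1 + base + (if i < rem then 1 else 0),
         st.2 ++ [(st.1, st.1 + base + (if i < rem then 1 else 0))]))
      (0, [])
    = (n * base + min n rem,
       (PySem.List.pyRange 0 n 1).map
         (fun i => (i * base + min i rem, (i + 1) * base + min (i + 1) rem))) := by
  have key : ∀ (k : Nat), (hk : (k : Int) ≤ n) →
      (PySem.List.pyRange 0 k 1).foldl
        (fun (st : Int × List (Int × Int)) (i : Int) =>
          (st.1 + base + (if i < rem then 1 else 0),
           st.2 ++ [(st.1, st.1 + base + (if i < rem then 1 else 0))]))
        (0, [])
      = ((k : Int) * base + min (k : Int) rem,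
         (PySem.List.pyRange 0 k 1).map
           (fun i => (i * base + min i rem, (i + 1) * base + min (i + 1) rem))) := by
    intro k hk
    induction k with
    | zero => simp; omega
    | succ m ih =>
      have hm : (m : Int) ≤ n := by push_cast at hk ⊢; omega
      have hstep : PySem.List.pyRange 0 ((m : Int) + 1) 1
          = PySem.List.pyRange 0 (m : Int) 1 ++ [(m : Int)] :=
        PySem.List.pyRange_one_succ_right (by positivity)
      have ihm := ih hm
      push_cast
      rw [hstep, List.foldl_append, List.map_append, ihm]
      simp only [List.foldl_cons, List.foldl_nil, List.map_cons, List.map_nil]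
      have harith : (m : Int) * base + min (m : Int) rem + base + (if (m : Int) < rem then 1 else 0)
          = ((m : Int) + 1) * base + min ((m : Int) + 1) rem := by
        by_cases h : (m : Int) < rem
        · have h1 : min (m : Int) rem = (m : Int) := by omega
          have h2 : min ((m : Int) + 1) rem = (m : Int) + 1 := by omega
          simp only [h, if_pos, h1, h2]; ring
        · have h1 : min (m : Int) rem = rem := by omega
          have h2 : min ((m : Int) + 1) rem = rem := by omega
          simp only [h, if_neg, not_false_iff, h1, h2]; ring
      rw [harith]
  have hcast : n = ((n.toNat : Nat) : Int) := by omega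
  rw [hcast]
  exact key n.toNat (by omega)

theorem split_slices_eq_alt (n_items n_parts : Int) (h : n_parts ≠ 0) :
    split_slices n_items n_parts = split_slices_alt n_items n_parts := by
  unfold split_slices split_slices_alt
  rcases hdm : PySem.Int.divmod? n_items n_parts with _ | ⟨base, rem⟩
  · rfl
  · by_cases hp : 0 < n_parts
    · have hrem : 0 ≤ rem := by
        have hdm' : PySem.Int.divmod? n_items n_parts
            = some (PySem.Int.floordiv n_items n_parts, PySem.Int.mod n_items n_parts) := by
          simp [PySem.Int.divmod?, PySem.Int.floordiv, PySem.Int.mod, h]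
        rw [hdm'] at hdm
        have : rem = PySem.Int.mod n_items n_parts := by
          injection hdm with hdm2; exact (congrArg Prod.snd hdm2).symm
        rw [this]
        exact PySem.Int.mod_nonneg n_items hp
      simpa using congrArg Prod.snd (split_slices_fold_inv base rem hrem n_parts (le_of_lt hp))
    · have hle : n_parts ≤ 0 := by omega
      rw [PySem.List.pyRange_one_eq_nil hle]
      rfl

-- ===== VERDICT (by name: the statement is the Claim_ definition above) =====
theorem split_slices_spec : Claim_equal_split_slices := by
  intro n_items n_parts _ hpre
  exact split_slices_eq_alt n_items n_parts hpre
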